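-- pv_equiv track=rewrite | github.com/kadirhanpolat/pytop | src/pytop/invariants.py | _is_basis
-- ===== SOURCE A (Python) =====
-- from typing import Any, Iterable
--
-- def _is_basis(points: tuple[Any, ...], opens: list[set[Any]], family: Iterable[set[Any]]) -> bool:
--     basis = [set(U) for U in family]
--     for O in opens:
--         if not O:
--             continue
--         for x in O:
--             if not any(x in B and B.issubset(O) for B in basis):
--                 return False
--     return True
-- ===== SOURCE B (Python) =====
-- def _is_basis(points, opens, family):
--     # Transposed loops: a single pass over the family merges each member into
--     # the running cover of every open set containing it; afterwards each open
--     # set is checked against its accumulated cover.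
--     os_ = [set(O) for O in opens]
--     covered = [set() for _ in os_]
--     for U in family:
--         B = set(U)
--         covered = [(c | B) if B <= O else c for O, c in zip(os_, covered)]
--     return all(O <= c for O, c in zip(os_, covered))
-- ===== Notes on version B (the rewrite author's own statement) =====
-- stated objective: alternative
-- what changed: A scans the whole family once per point of each open set; B transposes the loops: one pass over the family accumulates, per open set, the union of the family members contained in it, and a final pass checks each open set against its accumulated cover.
import Mathlib
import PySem

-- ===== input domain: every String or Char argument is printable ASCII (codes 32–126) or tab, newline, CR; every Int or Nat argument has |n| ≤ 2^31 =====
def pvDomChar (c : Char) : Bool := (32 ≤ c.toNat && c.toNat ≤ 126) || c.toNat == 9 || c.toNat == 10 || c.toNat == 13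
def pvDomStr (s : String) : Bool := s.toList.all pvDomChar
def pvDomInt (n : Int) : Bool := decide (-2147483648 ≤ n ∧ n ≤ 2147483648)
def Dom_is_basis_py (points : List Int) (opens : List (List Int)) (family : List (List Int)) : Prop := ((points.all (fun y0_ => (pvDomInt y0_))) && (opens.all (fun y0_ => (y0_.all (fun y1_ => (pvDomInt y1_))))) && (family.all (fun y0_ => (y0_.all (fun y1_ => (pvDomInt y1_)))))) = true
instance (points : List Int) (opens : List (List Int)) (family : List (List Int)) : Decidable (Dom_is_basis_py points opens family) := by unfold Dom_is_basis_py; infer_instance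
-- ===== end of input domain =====

-- B transposes A's loops: one pass over the family accumulates each open set's
-- cover (union of family members contained in it), then each open set is
-- checked against its cover.


-- ===== PORT A =====
def is_basis_py (points : List Int) (opens : List (List Int)) (family : List (List Int)) : Bool :=
  let basis := family.map (fun U => PySem.Set.ofList U)
  opens.all (fun Ol =>
    let O : PySem.Set Int := PySem.Set.ofList Ol
    if O = [] then true   -- "if not O: continue"
    else O.all (fun x =>
      basis.any (fun B => PySem.Set.contains B x && PySem.Set.issubset B O)))

-- ===== PORT B =====
-- '[(c | B) if B <= O else c for O, c in zip(os_, covered)]', transcribed as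
-- simultaneous recursion on the two lists
def pvUpdateCov (B : PySem.Set Int) : List (PySem.Set Int) → List (PySem.Set Int) → List (PySem.Set Int)
  | O :: os, c :: cs =>
      (if PySem.Set.issubset B O then PySem.Set.union c B else c) :: pvUpdateCov B os cs
  | _, _ => []

-- 'all(O <= c for O, c in zip(os_, covered))'
def pvCheckCov : List (PySem.Set Int) → List (PySem.Set Int) → Bool
  | O :: os, c :: cs => PySem.Set.issubset O c && pvCheckCov os cs
  | _, _ => true

def is_basis_py_alt (points : List Int) (opens : List (List Int)) (family : List (List Int)) : Bool :=
  let os := opens.map (fun O => PySem.Set.ofList O)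
  let covered := family.foldl
    (fun cov U => pvUpdateCov (PySem.Set.ofList U) os cov)
    (os.map (fun _ => PySem.Set.empty))
  pvCheckCov os covered

-- ===== PRECONDITION & SPEC =====
def Spec_is_basis_py (points : List Int) (opens : List (List Int)) (family : List (List Int)) (out : Bool) : Prop := out = is_basis_py_alt points opens family
instance (points : List Int) (opens : List (List Int)) (family : List (List Int)) (out : Bool) : Decidable (Spec_is_basis_py points opens family out) := by unfold Spec_is_basis_py; infer_instance

-- ===== CLAIM (what is proved, stated in full; the proofs are below) =====
def Claim_equal_is_basis_py : Prop := ∀ (points : List Int) (opens : List (List Int)) (family : List (List Int)), Dom_is_basis_py points opens family → Spec_is_basis_py points opens family (is_basis_py points opens family)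

-- ===== LEMMAS AND PROOFS =====

-- B's fold over the family acts independently on the head and tail of the cover list
lemma fold_updateCov_cons (fam : List (List Int)) (O : PySem.Set Int) (os : List (PySem.Set Int))
    (c : PySem.Set Int) (cs : List (PySem.Set Int)) :
    fam.foldl (fun cov U => pvUpdateCov (PySem.Set.ofList U) (O :: os) cov) (c :: cs)
    = (fam.foldl (fun a U => if PySem.Set.issubset (PySem.Set.ofList U) O
          then PySem.Set.union a (PySem.Set.ofList U) else a) c)
      :: (fam.foldl (fun cov U => pvUpdateCov (PySem.Set.ofList U) os cov) cs) := by
  induction fam generalizing c cs with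
  | nil => rfl
  | cons U fam ih => simp only [List.foldl_cons, pvUpdateCov, ih]

-- membership in the per-open-set accumulated cover
lemma mem_cover (fam : List (List Int)) (O : PySem.Set Int) (acc : PySem.Set Int) (x : Int) :
    x ∈ fam.foldl (fun a U => if PySem.Set.issubset (PySem.Set.ofList U) O
          then PySem.Set.union a (PySem.Set.ofList U) else a) acc ↔
    x ∈ acc ∨ ∃ U ∈ fam, PySem.Set.issubset (PySem.Set.ofList U) O = true ∧ x ∈ PySem.Set.ofList U := by
  induction fam generalizing acc with
  | nil => simp
  | cons V fam ih =>
      simp only [List.foldl_cons]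
      by_cases h : PySem.Set.issubset (PySem.Set.ofList V) O = true
      · rw [if_pos h, ih]
        simp only [PySem.Set.mem_union, List.mem_cons]
        constructor
        · rintro ((h1 | h1) | ⟨U, hU, hs, hx⟩)
          · exact Or.inl h1
          · exact Or.inr ⟨V, Or.inl rfl, h, h1⟩
          · exact Or.inr ⟨U, Or.inr hU, hs, hx⟩
        · rintro (h1 | ⟨U, hU | hU, hs, hx⟩)
          · exact Or.inl (Or.inl h1)
          · exact Or.inl (Or.inr (hU ▸ hx))
          · exact Or.inr ⟨U, hU, hs, hx⟩
      · rw [if_neg h, ih]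
        simp only [List.mem_cons]
        constructor
        · rintro (hc | ⟨U, hU, hs, hx⟩)
          · exact Or.inl hc
          · exact Or.inr ⟨U, Or.inr hU, hs, hx⟩
        · rintro (hc | ⟨U, hU | hU, hs, hx⟩)
          · exact Or.inl hc
          · exact absurd (hU ▸ hs) h
          · exact Or.inr ⟨U, hU, hs, hx⟩

-- per open set, A's per-point existential test equals coverage by the accumulated union
lemma per_open (fam : List (List Int)) (O : PySem.Set Int) :
    (if O = [] then true
     else O.all (fun x =>
       fam.any (fun U => PySem.Set.contains (PySem.Set.ofList U) x
         && PySem.Set.issubset (PySem.Set.ofList U) O)))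
    = PySem.Set.issubset O
        (fam.foldl (fun a U => if PySem.Set.issubset (PySem.Set.ofList U) O
            then PySem.Set.union a (PySem.Set.ofList U) else a) PySem.Set.empty) := by
  by_cases hO : O = []
  · subst hO
    simp [PySem.Set.issubset_iff]
  · rw [if_neg hO, Bool.eq_iff_iff, PySem.Set.issubset_iff]
    simp only [List.all_eq_true, List.any_eq_true, Bool.and_eq_true, PySem.Set.contains_iff]
    constructor
    · intro h x hx
      rw [mem_cover]
      obtain ⟨U, hU, hxU, hsub⟩ := h x hx
      exact Or.inr ⟨U, hU, hsub, hxU⟩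
    · intro h x hx
      have hm := h x hx
      rw [mem_cover] at hm
      rcases hm with hc | ⟨U, hU, hsub, hxU⟩
      · simp [PySem.Set.empty] at hc
      · exact ⟨U, hU, hxU, hsub⟩

-- the whole of B equals the whole of A, list of open sets by list of open sets
lemma main_cov (fam : List (List Int)) (os : List (PySem.Set Int)) :
    pvCheckCov os (fam.foldl (fun cov U => pvUpdateCov (PySem.Set.ofList U) os cov)
        (os.map (fun _ => PySem.Set.empty)))
    = os.all (fun O => if O = [] then true
        else O.all (fun x => fam.any (fun U => PySem.Set.contains (PySem.Set.ofList U) x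
          && PySem.Set.issubset (PySem.Set.ofList U) O))) := by
  induction os with
  | nil =>
      have h0 : fam.foldl (fun cov U => pvUpdateCov (PySem.Set.ofList U) ([] : List (PySem.Set Int)) cov) [] = [] := by
        induction fam with
        | nil => rfl
        | cons U fam ih => exact ih
      simp [pvCheckCov]
  | cons O os ih =>
      simp only [List.map_cons, fold_updateCov_cons, pvCheckCov, List.all_cons, per_open, ih]

-- ===== VERDICT (by name: the statement is the Claim_ definition above) =====
theorem is_basis_py_spec : Claim_equal_is_basis_py := by
  intro points opens family _
  unfold Spec_is_basis_py is_basis_py is_basis_py_alt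
  rw [main_cov, List.all_map]
  simp only [Function.comp_def]
  congr 1
  funext Ol
  simp [List.any_map, Function.comp_def, PySem.Set.mem_ofList]
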